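-- pv_equiv track=rewrite | github.com/jogamy/NAR | examples/KMA/utils/util.py | tags_to_label
-- ===== SOURCE A (Python) =====
-- def tags_to_label(tags):
--     tag_label = []
--     eojeol_lev = tags.split(" ")
--     for eoj in eojeol_lev:
--         morph_lev = eoj.split("+")
--         for tag in morph_lev:
--             tag_label.append(tag)
--             tag_label.append("+")
--         tag_label = tag_label[:-1]
--         tag_label.append(" ")
--     tag_label = tag_label[:-1]
--     return tag_label
-- ===== SOURCE B (Python) =====
-- import re
--
-- def tags_to_label(tags):
--     # One regex pass: a capturing group keeps each '+'/' ' delimiter as its own element.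
--     return re.split(r'([+ ])', tags)
-- ===== Notes on version B (the rewrite author's own statement) =====
-- stated objective: idiomatic
-- what changed: Replaces the two nested split/append/trim loops by a single regex split with a capturing delimiter class, re.split(r'([+ ])', tags), which yields the interleaved token/separator list in one pass.
import Mathlib
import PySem

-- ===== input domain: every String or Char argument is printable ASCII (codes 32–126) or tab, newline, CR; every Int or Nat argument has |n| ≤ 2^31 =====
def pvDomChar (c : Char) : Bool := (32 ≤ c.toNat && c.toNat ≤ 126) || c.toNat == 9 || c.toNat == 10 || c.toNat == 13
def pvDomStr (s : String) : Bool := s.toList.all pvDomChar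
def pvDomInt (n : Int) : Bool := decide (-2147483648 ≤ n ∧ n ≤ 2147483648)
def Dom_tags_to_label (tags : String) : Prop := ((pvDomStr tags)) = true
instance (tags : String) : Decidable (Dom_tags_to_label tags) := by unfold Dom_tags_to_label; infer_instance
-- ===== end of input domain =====

-- B replaces A's nested split/append/trim loops by one regex split with a captured delimiter class (ported as a single scan); objective: idiomatic.

-- ===== PORT A =====
def tags_to_label (tags : String) : List String :=
  let eojeol_lev : List String := (PySem.Chars.splitOn tags.toList [' ']).map String.ofList
  let tag_label : List String :=
    eojeol_lev.foldl (fun tl eoj =>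
      let morph_lev : List String := (PySem.Chars.splitOn eoj.toList ['+']).map String.ofList
      let tl2 := morph_lev.foldl (fun acc tag => acc ++ [tag, "+"]) tl
      let tl3 := PySem.List.slice tl2 none (some (-1))
      tl3 ++ [" "]) []
  PySem.List.slice tag_label none (some (-1))

-- ===== PORT B =====
-- hand port of Source B's re.split(r'([+ ])', tags): PySem has no regex, so the split with a
-- captured delimiter class is ported step for step as the single left-to-right scan it
-- denotes — exact for this concrete pattern (class [+ ], no quantifier/anchors).
def pvScan (l : List Char) (cur : List Char) : List String :=
  match l with
  | [] => [String.ofList cur]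
  | a :: rest =>
      if a = '+' ∨ a = ' ' then String.ofList cur :: String.ofList [a] :: pvScan rest []
      else pvScan rest (cur ++ [a])

def tags_to_label_alt (tags : String) : List String := pvScan tags.toList []

-- ===== PRECONDITION & SPEC =====
def Spec_tags_to_label (tags : String) (out : List String) : Prop := out = tags_to_label_alt tags
instance (tags : String) (out : List String) : Decidable (Spec_tags_to_label tags out) := by unfold Spec_tags_to_label; infer_instance

-- ===== CLAIM (what is proved, stated in full; the proofs are below) =====
def Claim_equal_tags_to_label : Prop := ∀ (tags : String), Dom_tags_to_label tags → Spec_tags_to_label tags (tags_to_label tags)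

-- ===== LEMMAS AND PROOFS =====

-- reference split on a single separator character (Python s.split(c), pieces as char lists)
def pvR1 (c : Char) : List Char → List (List Char)
  | [] => [[]]
  | a :: r => if a = c then [] :: pvR1 c r else (pvR1 c r).modifyHead (a :: ·)

-- reference for the combined interleaved token/separator list
def pvR : List Char → List (List Char)
  | [] => [[]]
  | a :: r => if a = '+' ∨ a = ' ' then [] :: [a] :: pvR r else (pvR r).modifyHead (a :: ·)

theorem pvR1_ne_nil (c : Char) (l : List Char) : pvR1 c l ≠ [] := by
  induction l with
  | nil => simp [pvR1]
  | cons a r ih =>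
    simp only [pvR1]
    split
    · simp
    · cases hr : pvR1 c r with
      | nil => exact absurd hr ih
      | cons x xs => simp

theorem pvR_ne_nil (l : List Char) : pvR l ≠ [] := by
  induction l with
  | nil => simp [pvR]
  | cons a r ih =>
    simp only [pvR]
    split
    · simp
    · cases hr : pvR r with
      | nil => exact absurd hr ih
      | cons x xs => simp

theorem pv_go_eq (c : Char) : ∀ (fuel : Nat) (l cur : List Char) (acc : List (List Char)),
    l.length < fuel →
    PySem.Chars.splitOn.go [c] fuel l cur acc =
      acc.reverse ++ (pvR1 c l).modifyHead (fun x => cur.reverse ++ x) := by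
  intro fuel
  induction fuel with
  | zero => intro l cur acc h; omega
  | succ f ih =>
    intro l cur acc h
    cases l with
    | nil => simp [PySem.Chars.splitOn.go, pvR1]
    | cons a rest =>
      have h' : rest.length < f := by simp at h; omega
      by_cases hac : a = c
      · subst hac
        have step : PySem.Chars.splitOn.go [a] (f+1) (a::rest) cur acc
            = PySem.Chars.splitOn.go [a] f rest [] (cur.reverse :: acc) := by
          simp [PySem.Chars.splitOn.go, List.isPrefixOf]
        rw [step, ih rest [] (cur.reverse :: acc) h']
        cases hr : pvR1 a rest with
        | nil => exact absurd hr (pvR1_ne_nil a rest)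
        | cons x xs => simp [pvR1, hr]
      · have hca : (c == a) = false := beq_false_of_ne (fun hh => hac hh.symm)
        have step : PySem.Chars.splitOn.go [c] (f+1) (a::rest) cur acc
            = PySem.Chars.splitOn.go [c] f rest (a :: cur) acc := by
          simp [PySem.Chars.splitOn.go, List.isPrefixOf, hca]
        rw [step, ih rest (a :: cur) acc h']
        cases hr : pvR1 c rest with
        | nil => exact absurd hr (pvR1_ne_nil c rest)
        | cons x xs => simp [pvR1, hr, hac]

theorem pv_splitOn_char (l : List Char) (c : Char) :
    PySem.Chars.splitOn l [c] = pvR1 c l := by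
  unfold PySem.Chars.splitOn
  rw [pv_go_eq c (l.length + 1) l [] [] (by omega)]
  cases h : pvR1 c l with
  | nil => exact absurd h (pvR1_ne_nil c l)
  | cons x xs => simp

theorem pv_scan_eq (l : List Char) : ∀ (cur : List Char),
    pvScan l cur = ((pvR l).modifyHead (fun x => cur ++ x)).map String.ofList := by
  induction l with
  | nil => intro cur; simp [pvScan, pvR]
  | cons a r ih =>
    intro cur
    simp only [pvScan, pvR]
    split
    · rw [ih []]
      cases hr : pvR r with
      | nil => exact absurd hr (pvR_ne_nil r)
      | cons x xs => simp
    · rw [ih (cur ++ [a])]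
      cases hr : pvR r with
      | nil => exact absurd hr (pvR_ne_nil r)
      | cons x xs => simp

theorem pv_pairs_dropLast : ∀ (m : List String), m ≠ [] →
    (m.flatMap (fun t => [t, "+"])).dropLast = List.intersperse "+" m := by
  intro m
  induction m with
  | nil => intro h; exact absurd rfl h
  | cons t m ih =>
    intro _
    cases m with
    | nil => simp [List.intersperse]
    | cons t' m' =>
      have h2 : (t' :: m').flatMap (fun t => [t, "+"]) ≠ [] := by
        simp [List.flatMap]
      have e : (t :: t' :: m').flatMap (fun t => [t, "+"])
          = t :: "+" :: (t' :: m').flatMap (fun t => [t, "+"]) := by simp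
      rw [e, List.dropLast_cons_of_ne_nil (by simp),
          List.dropLast_cons_of_ne_nil h2, ih (by simp)]
      simp [List.intersperse]

theorem pv_words_dropLast (g : String → List String) : ∀ (ws : List String), ws ≠ [] →
    (ws.flatMap (fun w => g w ++ [" "])).dropLast =
      (List.intersperse [" "] (ws.map g)).flatten := by
  intro ws
  induction ws with
  | nil => intro h; exact absurd rfl h
  | cons w ws ih =>
    intro _
    cases ws with
    | nil => simp
    | cons w' ws' =>
      have h2 : (w' :: ws').flatMap (fun w => g w ++ [" "]) ≠ [] := by
        simp [List.flatMap]
      have e : (w :: w' :: ws').flatMap (fun w => g w ++ [" "])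
          = (g w ++ [" "]) ++ (w' :: ws').flatMap (fun w => g w ++ [" "]) := by simp
      rw [e, List.dropLast_append_of_ne_nil h2, ih (by simp)]
      simp

theorem pv_map_intersperse {α β : Type} (f : α → β) (s : α) :
    ∀ (l : List α), (List.intersperse s l).map f = List.intersperse (f s) (l.map f) := by
  intro l
  induction l with
  | nil => simp
  | cons x l ih =>
    cases l with
    | nil => simp
    | cons y t => simp only [List.intersperse, List.map] at *; simp [ih]

theorem pv_flat_cons {α : Type} (s x : List α) (ps : List (List α)) (h : ps ≠ []) :
    (List.intersperse s (x :: ps)).flatten = x ++ s ++ (List.intersperse s ps).flatten := by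
  cases ps with
  | nil => exact absurd rfl h
  | cons p ps' => simp [List.intersperse]

theorem pv_flat_cons_head {α : Type} (s : List α) (a : α) (x : List α) (ps : List (List α)) :
    (List.intersperse s ((a :: x) :: ps)).flatten = a :: (List.intersperse s (x :: ps)).flatten := by
  cases ps <;> simp [List.intersperse]

theorem pv_flat_modifyHead {α : Type} (s : List α) (g : α → α) (x : List α) (ps : List (List α))
    (h : x ≠ []) :
    (List.intersperse s (x.modifyHead g :: ps)).flatten =
      ((List.intersperse s (x :: ps)).flatten).modifyHead g := by
  cases x with
  | nil => exact absurd rfl h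
  | cons y t => cases ps <;> simp [List.intersperse]

theorem pv_inter_modifyHead {α : Type} (s : α) (g : α → α) (x : α) (xs : List α) :
    List.intersperse s (List.modifyHead g (x :: xs)) = List.modifyHead g (List.intersperse s (x :: xs)) := by
  cases xs <;> simp [List.intersperse]

-- char-level form of A's result
def pvE (l : List Char) : List (List Char) :=
  (List.intersperse [[' ']]
    ((pvR1 ' ' l).map (fun w => List.intersperse ['+'] (pvR1 '+' w)))).flatten

theorem pv_E_eq_R : ∀ (l : List Char), pvE l = pvR l := by
  intro l
  induction l with
  | nil => simp [pvE, pvR, pvR1]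
  | cons a r ih =>
    obtain ⟨w, ws, hw⟩ : ∃ w ws, pvR1 ' ' r = w :: ws := by
      cases h : pvR1 ' ' r with
      | nil => exact absurd h (pvR1_ne_nil ' ' r)
      | cons w ws => exact ⟨w, ws, rfl⟩
    obtain ⟨y, t, hy⟩ : ∃ y t, pvR1 '+' w = y :: t := by
      cases h : pvR1 '+' w with
      | nil => exact absurd h (pvR1_ne_nil '+' w)
      | cons y t => exact ⟨y, t, rfl⟩
    have h3 : (List.intersperse [[' ']]
        (List.intersperse ['+'] (y :: t) ::
          List.map (fun w => List.intersperse ['+'] (pvR1 '+' w)) ws)).flatten = pvE r := by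
      unfold pvE
      rw [hw]
      simp only [List.map_cons, hy]
    by_cases hs : a = ' '
    · subst hs
      have h1 : pvR1 ' ' (' ' :: r) = [] :: pvR1 ' ' r := by
        simp [pvR1]
      unfold pvE
      rw [h1]
      simp only [List.map_cons]
      rw [pv_flat_cons _ _ _ (by simp [pvR1_ne_nil])]
      have h0 : List.intersperse ['+'] (pvR1 '+' ([] : List Char)) = [[]] := by
        simp [pvR1]
      rw [h0]
      have h4 : (List.intersperse [[' ']]
          (List.map (fun w => List.intersperse ['+'] (pvR1 '+' w)) (pvR1 ' ' r))).flatten = pvE r := rfl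
      rw [h4, ih]
      simp [pvR]
    · by_cases hp : a = '+'
      · subst hp
        have h1 : pvR1 ' ' ('+' :: r) = ('+' :: w) :: ws := by
          simp only [pvR1]; rw [if_neg (by decide), hw]; simp
        have h2 : List.intersperse ['+'] (pvR1 '+' ('+' :: w))
            = [] :: ['+'] :: List.intersperse ['+'] (y :: t) := by
          have hh : pvR1 '+' ('+' :: w) = [] :: pvR1 '+' w := by simp [pvR1]
          rw [hh, hy]; simp [List.intersperse]
        unfold pvE
        rw [h1]
        simp only [List.map_cons]
        rw [h2, pv_flat_cons_head, pv_flat_cons_head, h3, ih]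
        simp [pvR]
      · have h1 : pvR1 ' ' (a :: r) = (a :: w) :: ws := by
          simp only [pvR1]; rw [if_neg hs, hw]; simp
        have h2 : List.intersperse ['+'] (pvR1 '+' (a :: w))
            = List.modifyHead (a :: ·) (List.intersperse ['+'] (y :: t)) := by
          simp only [pvR1]; rw [if_neg hp, hy]
          exact pv_inter_modifyHead _ _ _ _
        unfold pvE
        rw [h1]
        simp only [List.map_cons]
        rw [h2, pv_flat_modifyHead _ _ _ _ (by cases t <;> simp [List.intersperse]), h3, ih]
        simp only [pvR]
        rw [if_neg (by tauto)]

theorem pv_A_eq (tags : String) :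
    tags_to_label tags = (pvR tags.toList).map String.ofList := by
  have hto : ∀ (x : List Char), (String.ofList x).toList = x := fun x => by simp
  have stepfun : ∀ (tl : List String) (eoj : String),
      (PySem.List.slice
        (((PySem.Chars.splitOn eoj.toList ['+']).map String.ofList).foldl
          (fun acc tag => acc ++ [tag, "+"]) tl) none (some (-1))) ++ [" "]
      = tl ++ (List.intersperse "+" ((pvR1 '+' eoj.toList).map String.ofList) ++ [" "]) := by
    intro tl eoj
    have hm : (pvR1 '+' eoj.toList).map String.ofList ≠ [] := by
      intro hh
      exact pvR1_ne_nil '+' eoj.toList (by simpa using hh)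
    have hne : ((pvR1 '+' eoj.toList).map String.ofList).flatMap (fun t => [t, "+"]) ≠ [] := by
      cases hx : (pvR1 '+' eoj.toList).map String.ofList with
      | nil => exact absurd hx hm
      | cons z zs => simp
    rw [pv_splitOn_char, PySem.List.foldl_append_eq_flatMap, PySem.List.slice_to_neg_one,
        List.dropLast_append_of_ne_nil hne, pv_pairs_dropLast _ hm, List.append_assoc]
  have hws : (pvR1 ' ' tags.toList).map String.ofList ≠ [] := by
    intro hh
    exact pvR1_ne_nil ' ' tags.toList (by simpa using hh)
  have start : tags_to_label tags = PySem.List.slice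
      ((((PySem.Chars.splitOn tags.toList [' ']).map String.ofList).foldl
        (fun tl eoj =>
          PySem.List.slice
            (((PySem.Chars.splitOn eoj.toList ['+']).map String.ofList).foldl
              (fun acc tag => acc ++ [tag, "+"]) tl) none (some (-1)) ++ [" "]) []))
      none (some (-1)) := rfl
  rw [start, pv_splitOn_char]
  simp only [stepfun]
  have hfold := PySem.List.foldl_append_eq_flatMap
      (fun eoj => List.intersperse "+" ((pvR1 '+' eoj.toList).map String.ofList) ++ [" "])
      ((pvR1 ' ' tags.toList).map String.ofList) []
  have hw2 := pv_words_dropLast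
      (fun eoj => List.intersperse "+" ((pvR1 '+' eoj.toList).map String.ofList))
      ((pvR1 ' ' tags.toList).map String.ofList) hws
  simp only [hfold, List.nil_append, PySem.List.slice_to_neg_one]
  simp only [hw2]
  have hmap : (((pvR1 ' ' tags.toList).map String.ofList).map
        (fun eoj => List.intersperse "+" ((pvR1 '+' eoj.toList).map String.ofList)))
      = ((pvR1 ' ' tags.toList).map (fun w => List.intersperse ['+'] (pvR1 '+' w))).map
          (List.map String.ofList) := by
    rw [List.map_map, List.map_map]
    refine List.map_congr_left (fun w _ => ?_)
    show List.intersperse "+" ((pvR1 '+' (String.ofList w).toList).map String.ofList)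
        = List.map String.ofList (List.intersperse ['+'] (pvR1 '+' w))
    rw [hto, pv_map_intersperse]
  rw [hmap]
  have hsep : ([" "] : List String) = List.map String.ofList [[' ']] := rfl
  rw [hsep, ← pv_map_intersperse (List.map String.ofList) [[' ']], ← List.map_flatten]
  have hE : (List.intersperse [[' ']]
      ((pvR1 ' ' tags.toList).map (fun w => List.intersperse ['+'] (pvR1 '+' w)))).flatten
      = pvE tags.toList := rfl
  rw [hE, pv_E_eq_R]

theorem pv_main (tags : String) : tags_to_label tags = tags_to_label_alt tags := by
  rw [pv_A_eq, tags_to_label_alt, pv_scan_eq tags.toList []]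
  cases h : pvR tags.toList with
  | nil => exact absurd h (pvR_ne_nil tags.toList)
  | cons x xs => simp

-- ===== VERDICT (by name: the statement is the Claim_ definition above) =====
theorem tags_to_label_spec : Claim_equal_tags_to_label := by
  intro tags _
  unfold Spec_tags_to_label
  exact pv_main tags
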